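-- pv_equiv track=rewrite | github.com/dilkas/kr23-db | solutions.py | two_dimensional_injections
-- ===== SOURCE A (Python) =====
-- def two_dimensional_injections(m, n):
--     if m == 0 and n == 0:
--         return 1
--     if n == 0:
--         return 0
--     return two_dimensional_injections(m, n - 1) + m * two_dimensional_injections(
--         m - 1, n - 1
--     )
-- ===== SOURCE B (Python) =====
-- def two_dimensional_injections(m, n):
--     # number of injections: falling factorial n*(n-1)*...*(n-m+1); 0 if impossible
--     if m < 0 or n < m:
--         return 0
--     r = 1
--     for i in range(m):
--         r *= n - i
--     return r
-- ===== Notes on version B (the rewrite author's own statement) =====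
-- stated objective: faster
-- what changed: Replaces the exponential double recursion with the closed-form falling factorial n*(n-1)*...*(n-m+1) computed by a single loop (0 when m<0 or n<m).
import Mathlib
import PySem

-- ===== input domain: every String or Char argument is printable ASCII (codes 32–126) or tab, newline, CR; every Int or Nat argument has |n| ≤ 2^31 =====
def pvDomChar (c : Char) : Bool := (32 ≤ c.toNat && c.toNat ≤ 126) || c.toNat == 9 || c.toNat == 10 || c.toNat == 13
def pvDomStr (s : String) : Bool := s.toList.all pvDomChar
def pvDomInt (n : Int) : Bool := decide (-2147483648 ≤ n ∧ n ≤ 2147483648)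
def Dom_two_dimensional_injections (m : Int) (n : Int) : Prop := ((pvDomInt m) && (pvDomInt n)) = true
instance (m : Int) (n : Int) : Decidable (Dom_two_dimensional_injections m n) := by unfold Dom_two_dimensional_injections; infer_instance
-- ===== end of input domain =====

-- B replaces A's exponential double recursion with the closed-form falling factorial (faster).


-- ===== PORT A =====
-- the `n ≤ 0` test (where Python tests `n == 0`) is only a totality guard: for n < 0 the
-- Python recursion never returns (RecursionError), which Pre_ excludes; for n ≥ 0 it is `n == 0`.
def two_dimensional_injections (m : Int) (n : Int) : Int :=
  if m = 0 ∧ n = 0 then 1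
  else if _h : n ≤ 0 then 0
  else two_dimensional_injections m (n - 1) + m * two_dimensional_injections (m - 1) (n - 1)
termination_by n.toNat
decreasing_by all_goals omega

-- ===== PORT B =====
def two_dimensional_injections_alt (m : Int) (n : Int) : Int :=
  if m < 0 ∨ n < m then 0
  else (List.range m.toNat).foldl (fun (r : Int) (i : Nat) => r * (n - (i : Int))) 1

-- ===== PRECONDITION & SPEC =====
-- Pre_ excludes n < 0, on which the Python A recurses without bound and raises RecursionError.
def Pre_two_dimensional_injections (m : Int) (n : Int) : Prop := 0 ≤ n
instance (m : Int) (n : Int) : Decidable (Pre_two_dimensional_injections m n) := by unfold Pre_two_dimensional_injections; infer_instance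
def pvWitness_two_dimensional_injections : Int × Int := (2, 3)

def Spec_two_dimensional_injections (m : Int) (n : Int) (out : Int) : Prop := out = two_dimensional_injections_alt m n
instance (m : Int) (n : Int) (out : Int) : Decidable (Spec_two_dimensional_injections m n out) := by unfold Spec_two_dimensional_injections; infer_instance

-- ===== CLAIM (what is proved, stated in full; the proofs are below) =====
def Claim_equal_two_dimensional_injections : Prop := ∀ (m : Int) (n : Int), Dom_two_dimensional_injections m n → Pre_two_dimensional_injections m n → Spec_two_dimensional_injections m n (two_dimensional_injections m n)
-- ===== LEMMAS AND PROOFS =====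

-- falling factorial: ff n k = n * (n-1) * ... * (n-k+1)
def ff (n : Int) : Nat → Int
  | 0 => 1
  | k + 1 => ff n k * (n - (k : Int))

theorem foldl_range_ff (n : Int) (k : Nat) (acc : Int) :
    (List.range k).foldl (fun (r : Int) (i : Nat) => r * (n - (i : Int))) acc = acc * ff n k := by
  induction k generalizing acc with
  | zero => simp [ff]
  | succ k ih =>
    rw [List.range_succ, List.foldl_append, ih]
    show acc * ff n k * (n - (k : Int)) = acc * ff n (k + 1)
    rw [ff]; ring

theorem ff_zero_of_lt (n : Int) (k : Nat) (h0 : 0 ≤ n) (h : n < (k : Int)) : ff n k = 0 := by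
  induction k with
  | zero => exfalso; omega
  | succ k ih =>
    show ff n k * (n - (k : Int)) = 0
    by_cases hk : n < (k : Int)
    · rw [ih hk, zero_mul]
    · have : n = (k : Int) := by omega
      rw [this]; ring

theorem ff_rec (n : Int) (k : Nat) :
    ff (n + 1) (k + 1) = ff n (k + 1) + ((k : Int) + 1) * ff n k := by
  induction k with
  | zero => simp [ff]
  | succ k ih =>
    have e1 : ff (n + 1) (k + 1 + 1) = ff (n + 1) (k + 1) * (n + 1 - ((k + 1 : Nat) : Int)) := rfl
    have e2 : ff n (k + 1 + 1) = ff n (k + 1) * (n - ((k + 1 : Nat) : Int)) := rfl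
    have e3 : ff n (k + 1) = ff n k * (n - (k : Int)) := rfl
    rw [e1, e2, ih]
    push_cast
    rw [e3]; ring

-- closed-form helper: what B computes, for 0 ≤ n
def g (m : Int) (n : Int) : Int := if m < 0 then 0 else ff n m.toNat

theorem alt_eq_g (m n : Int) (hn : 0 ≤ n) : two_dimensional_injections_alt m n = g m n := by
  unfold two_dimensional_injections_alt g
  by_cases hm : m < 0
  · simp [hm]
  · by_cases hnm : n < m
    · rw [if_pos (Or.inr hnm), if_neg hm,
        ff_zero_of_lt n m.toNat hn (by omega)]
    · rw [if_neg (by tauto), if_neg hm, foldl_range_ff, one_mul]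

theorem a_eq_g (m n : Int) (hn : 0 ≤ n) : two_dimensional_injections m n = g m n := by
  obtain ⟨k, hk⟩ : ∃ k : Nat, n = (k : Int) := ⟨n.toNat, by omega⟩
  subst hk
  induction k generalizing m with
  | zero =>
    simp only [Nat.cast_zero]
    rw [two_dimensional_injections]
    by_cases hm : m = 0
    · simp [hm, g, ff]
    · rw [if_neg (by simp [hm]), dif_pos le_rfl]
      unfold g
      by_cases hneg : m < 0
      · rw [if_pos hneg]
      · rw [if_neg hneg]
        exact (ff_zero_of_lt 0 m.toNat le_rfl (by omega)).symm
  | succ k ih =>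
    have hc : ((k + 1 : Nat) : Int) = (k : Int) + 1 := by push_cast; ring
    rw [hc, two_dimensional_injections]
    rw [if_neg (by push_cast; omega), dif_neg (by push_cast; omega)]
    have hk1 : (k : Int) + 1 - 1 = (k : Int) := by ring
    rw [hk1, ih m (by omega), ih (m - 1) (by omega)]
    unfold g
    by_cases hm0 : m = 0
    · subst hm0; simp [ff]
    · by_cases hneg : m < 0
      · have h2 : m - 1 < 0 := by omega
        simp [hneg, h2]
      · have h2 : ¬ m - 1 < 0 := by omega
        rw [if_neg hneg, if_neg h2, if_neg hneg]
        have hmt : m.toNat = (m - 1).toNat + 1 := by omega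
        rw [hmt, ff_rec]
        have hcast : (((m - 1).toNat : Nat) : Int) + 1 = m := by omega
        rw [hcast]

-- ===== VERDICT (by name: the statement is the Claim_ definition above) =====
theorem two_dimensional_injections_spec : Claim_equal_two_dimensional_injections := by
  intro m n _ hpre
  unfold Spec_two_dimensional_injections
  rw [a_eq_g m n hpre, alt_eq_g m n hpre]
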